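-- pv_equiv track=rewrite | github.com/murpheelee/nessus-report-parser | lib/reporter.py | _group_findings
-- ===== SOURCE A (Python) =====
-- TIER_ORDER = {"P0": 0, "P1": 1, "P2": 2, "P3": 3}
--
-- def _group_findings(findings: list[dict], group_by: str) -> dict:
--     """Group findings by the specified field."""
--     groups: dict[str, list] = {}
--     for f in findings:
--         if group_by == "host":
--             key = f["host"]
--         elif group_by == "family":
--             key = f["family"] or "Unknown"
--         elif group_by == "tier":
--             key = f.get("rbvm_tier", "P3")
--         else:
--             key = f["severity"].capitalize()
--         groups.setdefault(key, []).append(f)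
--
--     if group_by == "severity":
--         order = {"Critical": 0, "High": 1, "Medium": 2, "Low": 3}
--         groups = dict(sorted(groups.items(), key=lambda x: order.get(x[0], 99)))
--     elif group_by == "tier":
--         groups = dict(sorted(groups.items(), key=lambda x: TIER_ORDER.get(x[0], 99)))
--
--     return groups
-- ===== SOURCE B (Python) =====
-- TIER_ORDER = {"P0": 0, "P1": 1, "P2": 2, "P3": 3}
--
-- def _group_findings(findings, group_by):
--     """Group findings by field; ranked modes use a bucket pass instead of a sort."""
--     groups = {}
--     if group_by in ("severity", "tier"):
--         order = {"Critical": 0, "High": 1, "Medium": 2, "Low": 3} if group_by == "severity" else TIER_ORDER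
--         keyed = [(f.get("rbvm_tier", "P3") if group_by == "tier" else f["severity"].capitalize(), f)
--                  for f in findings]
--         for r in (0, 1, 2, 3, 99):  # emit rank-r groups, keys in first-appearance order
--             for k, f in keyed:
--                 if order.get(k, 99) == r:
--                     groups.setdefault(k, []).append(f)
--         return groups
--     for f in findings:
--         if group_by == "host":
--             key = f["host"]
--         elif group_by == "family":
--             key = f["family"] or "Unknown"
--         else:
--             key = f["severity"].capitalize()
--         groups.setdefault(key, []).append(f)
--     return groups
-- ===== Notes on version B (the rewrite author's own statement) =====
-- stated objective: alternative
-- what changed: For the severity/tier modes, A hash-groups the findings and then comparison-sorts the group items by rank; B does a bucket pass over the five possible rank values (0,1,2,3,99), emitting each rank's groups in first-appearance order, so no sort is performed; host/family stay a single-pass insertion-order dict.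
import Mathlib
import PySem

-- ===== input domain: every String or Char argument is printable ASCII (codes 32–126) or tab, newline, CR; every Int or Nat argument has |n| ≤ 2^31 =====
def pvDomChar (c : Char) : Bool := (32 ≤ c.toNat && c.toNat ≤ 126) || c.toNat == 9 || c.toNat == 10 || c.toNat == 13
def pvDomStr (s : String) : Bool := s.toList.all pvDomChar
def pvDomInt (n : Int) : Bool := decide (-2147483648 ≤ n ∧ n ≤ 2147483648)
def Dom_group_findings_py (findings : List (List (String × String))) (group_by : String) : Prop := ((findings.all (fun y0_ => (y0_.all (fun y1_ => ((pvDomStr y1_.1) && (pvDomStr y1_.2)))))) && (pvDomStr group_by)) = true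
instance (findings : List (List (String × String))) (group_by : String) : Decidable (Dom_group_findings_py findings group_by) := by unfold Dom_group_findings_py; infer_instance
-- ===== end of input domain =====

-- B replaces A's "hash-group then sort the group keys" (ranked modes) by a single bucket pass
-- over the five possible rank values — no comparison sort at all (objective: alternative).

-- shared helpers (each is the exact port of the corresponding Python expression)
-- str.capitalize(): first char uppercased, rest lowercased — exact on the ASCII domain
def pvCapitalize (s : String) : String :=
  match s.toList with
  | [] => ""
  | c :: cs => String.mk (PySem.Chars.upperChar c :: PySem.Chars.lower cs)

def pvSevOrder : PySem.Dict String Int :=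
  PySem.Dict.ofList [("Critical", 0), ("High", 1), ("Medium", 2), ("Low", 3)]

-- TIER_ORDER module constant
def pvTierOrder : PySem.Dict String Int :=
  PySem.Dict.ofList [("P0", 0), ("P1", 1), ("P2", 2), ("P3", 3)]

-- ===== PORT A =====
-- the key-selection if/elif chain of A's loop body; f["…"] is get? (KeyError excluded by Pre_,
-- the .getD "" default is never reached inside Pre_)
def pvKeyA (group_by : String) (f : List (String × String)) : String :=
  if group_by == "host" then ((PySem.Dict.mk f).get? "host").getD ""
  else if group_by == "family" then
    (if (((PySem.Dict.mk f).get? "family").getD "") == "" then "Unknown"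
     else ((PySem.Dict.mk f).get? "family").getD "")
  else if group_by == "tier" then (PySem.Dict.mk f).getD "rbvm_tier" "P3"
  else pvCapitalize (((PySem.Dict.mk f).get? "severity").getD "")

def group_findings_py (findings : List (List (String × String))) (group_by : String) :
    List (String × List (List (String × String))) :=
  -- groups.setdefault(key, []).append(f)  ==  modify key [] (· ++ [f])
  let groups := findings.foldl
    (fun d f => d.modify (pvKeyA group_by f) [] (fun g => g ++ [f])) PySem.Dict.empty
  if group_by == "severity" then
    PySem.List.sorted groups.items (fun x => pvSevOrder.getD x.1 99) false
  else if group_by == "tier" then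
    PySem.List.sorted groups.items (fun x => pvTierOrder.getD x.1 99) false
  else groups.items

-- ===== PORT B =====
-- the conditional expression inside B's `keyed` comprehension (ranked modes only)
def pvRankedKeyB (group_by : String) (f : List (String × String)) : String :=
  if group_by == "tier" then (PySem.Dict.mk f).getD "rbvm_tier" "P3"
  else pvCapitalize (((PySem.Dict.mk f).get? "severity").getD "")

-- the key-selection chain of B's plain (host/family/other) loop
def pvPlainKeyB (group_by : String) (f : List (String × String)) : String :=
  if group_by == "host" then ((PySem.Dict.mk f).get? "host").getD ""
  else if group_by == "family" then
    (if (((PySem.Dict.mk f).get? "family").getD "") == "" then "Unknown"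
     else ((PySem.Dict.mk f).get? "family").getD "")
  else pvCapitalize (((PySem.Dict.mk f).get? "severity").getD "")

def group_findings_py_alt (findings : List (List (String × String))) (group_by : String) :
    List (String × List (List (String × String))) :=
  if group_by == "severity" || group_by == "tier" then
    let order := if group_by == "severity" then pvSevOrder else pvTierOrder
    let keyed := findings.map (fun f => (pvRankedKeyB group_by f, f))
    -- bucket pass: for r in (0,1,2,3,99): for k,f in keyed: if rank(k)==r: setdefault/append
    let groups := [(0 : Int), 1, 2, 3, 99].foldl
      (fun g r => keyed.foldl
        (fun g p => if order.getD p.1 99 == r then g.modify p.1 [] (fun v => v ++ [p.2]) else g) g)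
      PySem.Dict.empty
    groups.items
  else
    (findings.foldl
      (fun d f => d.modify (pvPlainKeyB group_by f) [] (fun g => g ++ [f]))
      PySem.Dict.empty).items

-- ===== PRECONDITION & SPEC =====
-- Pre_ excludes exactly the inputs where Python A raises KeyError: a finding missing the
-- "host"/"family"/"severity" key required by the chosen mode (the "tier" mode uses .get and is total).
def Pre_group_findings_py (findings : List (List (String × String))) (group_by : String) : Prop :=
  if group_by = "host" then ∀ f ∈ findings, ((PySem.Dict.mk f).get? "host").isSome = true
  else if group_by = "family" then ∀ f ∈ findings, ((PySem.Dict.mk f).get? "family").isSome = true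
  else if group_by = "tier" then True
  else ∀ f ∈ findings, ((PySem.Dict.mk f).get? "severity").isSome = true

instance (findings : List (List (String × String))) (group_by : String) :
    Decidable (Pre_group_findings_py findings group_by) := by
  unfold Pre_group_findings_py; infer_instance

def pvWitness_group_findings_py : (List (List (String × String))) × String :=
  ([[("severity", "high")], [("severity", "LOW")]], "severity")

def Spec_group_findings_py (findings : List (List (String × String))) (group_by : String)
    (out : List (String × List (List (String × String)))) : Prop :=
  out = group_findings_py_alt findings group_by

instance (findings : List (List (String × String))) (group_by : String)
    (out : List (String × List (List (String × String)))) :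
    Decidable (Spec_group_findings_py findings group_by out) := by
  unfold Spec_group_findings_py; infer_instance

-- ===== CLAIM (what is proved, stated in full; the proofs are below) =====
def Claim_equal_group_findings_py : Prop := ∀ (findings : List (List (String × String))) (group_by : String), Dom_group_findings_py findings group_by → Pre_group_findings_py findings group_by → Spec_group_findings_py findings group_by (group_findings_py findings group_by)

-- ===== LEMMAS AND PROOFS =====

def pvGrp (l : List (String × List (String × String))) :
    List (String × List (List (String × String))) :=
  (PySem.Set.ofList (l.map Prod.fst)).map
    (fun k => (k, (l.filter (fun p => p.1 == k)).map Prod.snd))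

theorem pv_dict_fold_items (l : List (String × List (String × String))) :
    (l.foldl (fun d p => d.modify p.1 [] (fun v => v ++ [p.2])) PySem.Dict.empty).items
      = pvGrp l := by
  have hkeys : (l.foldl (fun d p => d.modify p.1 [] (fun v => v ++ [p.2])) PySem.Dict.empty).keys
      = PySem.Set.ofList (l.map Prod.fst) := by
    have := PySem.Dict.keys_foldl_modify_key l Prod.fst []
      (fun _ p v => v ++ [p.2]) (PySem.Dict.empty)
    simpa [PySem.Dict.keys_empty, PySem.Set.update, PySem.Set.ofList, PySem.Set.empty] using this
  have hnd : (l.foldl (fun d p => d.modify p.1 [] (fun v => v ++ [p.2])) PySem.Dict.empty).keys.Nodup := by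
    apply PySem.Dict.nodup_keys_foldl_modify_key
    simp [PySem.Dict.keys_empty]
  rw [PySem.Dict.items_eq_map_keys _ hnd [], hkeys]
  unfold pvGrp
  apply List.map_congr_left
  intro k _
  have := PySem.Dict.getD_foldl_modify_append l PySem.Dict.empty k
  simp only [PySem.Dict.getD_empty] at this
  simp [this]

theorem pvGrp_snoc (l : List (String × List (String × String))) (p) :
    pvGrp (l ++ [p]) =
      if p.1 ∈ l.map Prod.fst then
        (pvGrp l).map (fun g => if g.1 == p.1 then (g.1, g.2 ++ [p.2]) else g)
      else pvGrp l ++ [(p.1, [p.2])] := by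
  unfold pvGrp
  have hset : PySem.Set.ofList ((l ++ [p]).map Prod.fst)
      = PySem.Set.add (PySem.Set.ofList (l.map Prod.fst)) p.1 := by
    simp [PySem.Set.ofList, PySem.Set.update, List.foldl_append]
  by_cases hmem : p.1 ∈ l.map Prod.fst
  · have hcont : (PySem.Set.ofList (l.map Prod.fst)).contains p.1 = true := by
      simp [List.contains_iff_mem, PySem.Set.mem_ofList, hmem]
    rw [hset]
    simp only [PySem.Set.add, hcont, if_pos, hmem, if_true]
    rw [List.map_map]
    apply List.map_congr_left
    intro k _
    by_cases hk : k = p.1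
    · subst hk
      simp [List.filter_append, List.filter_cons]
    · have : (p.1 == k) = false := by simp [Ne.symm hk]
      simp [List.filter_append, List.filter_cons, this, hk]
  · have hcont : (PySem.Set.ofList (l.map Prod.fst)).contains p.1 = false := by
      simp [List.contains_iff_mem, PySem.Set.mem_ofList, hmem]
    rw [hset]
    simp only [PySem.Set.add, hcont, Bool.false_eq_true, if_false, hmem, List.map_append]
    congr 1
    · apply List.map_congr_left
      intro k hk
      have hkl : k ∈ l.map Prod.fst := (PySem.Set.mem_ofList _ _).mp hk
      have hne : k ≠ p.1 := fun h => hmem (h ▸ hkl)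
      have : (p.1 == k) = false := by simp [Ne.symm hne]
      simp [List.filter_append, List.filter_cons, this]
    · have hnil : l.filter (fun q => q.1 == p.1) = [] := by
        rw [List.filter_eq_nil_iff]
        intro q hq
        simp only [beq_iff_eq]
        exact fun h => hmem (h ▸ List.mem_map_of_mem hq)
      simp [List.filter_append, List.filter_cons, hnil]

theorem pvGrp_fst_mem (l : List (String × List (String × String))) (g) (hg : g ∈ pvGrp l) :
    g.1 ∈ l.map Prod.fst := by
  unfold pvGrp at hg
  obtain ⟨k, hk, rfl⟩ := List.mem_map.mp hg
  exact (PySem.Set.mem_ofList _ _).mp hk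

theorem pvGrp_append_disjoint (l1 l2 : List (String × List (String × String)))
    (h : ∀ p ∈ l2, p.1 ∉ l1.map Prod.fst) :
    pvGrp (l1 ++ l2) = pvGrp l1 ++ pvGrp l2 := by
  induction l2 using List.reverseRecOn with
  | nil => simp [pvGrp]
  | append_singleton l2 p ih =>
    have hp := h p (by simp)
    have hih := ih (fun q hq => h q (List.mem_append_left _ hq))
    rw [← List.append_assoc, pvGrp_snoc, pvGrp_snoc, hih]
    by_cases hmem : p.1 ∈ l2.map Prod.fst
    · have : p.1 ∈ (l1 ++ l2).map Prod.fst := by simp [List.map_append]; right; simpa using hmem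
      rw [if_pos this, if_pos hmem, List.map_append]
      congr 1
      have : (pvGrp l1).map (fun g => if (g.1 == p.1) = true then (g.1, g.2 ++ [p.2]) else g)
          = (pvGrp l1).map id := by
        apply List.map_congr_left
        intro g hg
        have : g.1 ≠ p.1 := fun hEq => hp (hEq ▸ pvGrp_fst_mem l1 g hg)
        simp [this]
      rw [this, List.map_id]
    · have : p.1 ∉ (l1 ++ l2).map Prod.fst := by
        simp only [List.map_append, List.mem_append]
        rintro (h1 | h2)
        · exact hp h1
        · exact hmem h2
      rw [if_neg this, if_neg hmem, List.append_assoc]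

theorem pvGrp_filter (rank : String → Int) (r : Int) (l : List (String × List (String × String))) :
    (pvGrp l).filter (fun g => rank g.1 == r) = pvGrp (l.filter (fun p => rank p.1 == r)) := by
  induction l using List.reverseRecOn with
  | nil => simp [pvGrp]
  | append_singleton l p ih =>
    have hPmod : ∀ (w : List (List (String × String))),
        ((pvGrp l).map (fun g => if (g.1 == p.1) = true then (g.1, g.2 ++ w) else g)).filter
            (fun g => rank g.1 == r)
          = ((pvGrp l).filter (fun g => rank g.1 == r)).map
            (fun g => if (g.1 == p.1) = true then (g.1, g.2 ++ w) else g) := by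
      intro w
      rw [List.filter_map]
      congr 1
      apply List.filter_congr
      intro g _
      by_cases hg : g.1 = p.1 <;> simp [hg]
    by_cases hr : rank p.1 = r
    · have hQ : (l ++ [p]).filter (fun q => rank q.1 == r)
          = l.filter (fun q => rank q.1 == r) ++ [p] := by
        simp [List.filter_append, hr]
      rw [hQ, pvGrp_snoc, pvGrp_snoc]
      by_cases hmem : p.1 ∈ l.map Prod.fst
      · obtain ⟨q, hq, hq1⟩ := List.mem_map.mp hmem
        have hmem' : p.1 ∈ (l.filter (fun q => rank q.1 == r)).map Prod.fst :=
          List.mem_map.mpr ⟨q, List.mem_filter.mpr ⟨hq, by simp [hq1, hr]⟩, hq1⟩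
        rw [if_pos hmem, if_pos hmem', hPmod, ih]
      · have hmem' : p.1 ∉ (l.filter (fun q => rank q.1 == r)).map Prod.fst := by
          intro hc
          obtain ⟨q, hq, hq1⟩ := List.mem_map.mp hc
          exact hmem (List.mem_map.mpr ⟨q, (List.mem_filter.mp hq).1, hq1⟩)
        rw [if_neg hmem, if_neg hmem', List.filter_append, ih]
        simp [hr]
    · have hQ : (l ++ [p]).filter (fun q => rank q.1 == r)
          = l.filter (fun q => rank q.1 == r) := by
        simp [List.filter_append, hr]
      rw [hQ, pvGrp_snoc, ← ih]
      by_cases hmem : p.1 ∈ l.map Prod.fst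
      · rw [if_pos hmem, hPmod]
        conv_rhs => rw [← List.map_id ((pvGrp l).filter (fun g => rank g.1 == r))]
        apply List.map_congr_left
        intro g hg
        have hgr : rank g.1 = r := by simpa using (List.mem_filter.mp hg).2
        have : g.1 ≠ p.1 := fun hEq => hr (hEq ▸ hgr)
        simp [this]
      · rw [if_neg hmem, List.filter_append]
        simp [hr]

theorem pvGrp_flatMap (rank : String → Int) (vals : List Int) (hnd : vals.Nodup)
    (l : List (String × List (String × String))) :
    pvGrp (vals.flatMap (fun v => l.filter (fun p => rank p.1 == v)))
      = vals.flatMap (fun v => pvGrp (l.filter (fun p => rank p.1 == v))) := by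
  induction vals with
  | nil => simp [pvGrp]
  | cons v vs ih =>
    have hv : v ∉ vs := (List.nodup_cons.mp hnd).1
    simp only [List.flatMap_cons]
    rw [pvGrp_append_disjoint, ih (List.nodup_cons.mp hnd).2]
    intro q hq
    obtain ⟨w, hw, hqw⟩ := List.mem_flatMap.mp hq
    have hqr : rank q.1 = w := by simpa using (List.mem_filter.mp hqw).2
    intro hc
    obtain ⟨u, hu, hu1⟩ := List.mem_map.mp hc
    have hur : rank u.1 = v := by simpa using (List.mem_filter.mp hu).2
    rw [← hu1, hur] at hqr
    exact hv (hqr ▸ hw)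

theorem pv_insertBy_skip {α : Type} (before : α → α → Bool) (x : α) (l1 l2 : List α)
    (h1 : ∀ y ∈ l1, before x y = false) :
    PySem.List.insertBy before x (l1 ++ l2) = l1 ++ PySem.List.insertBy before x l2 := by
  cases l2 with
  | nil =>
    have := PySem.List.insertBy_of_forall_not_before before x l1 h1
    simpa [PySem.List.insertBy] using this
  | cons z zs =>
    induction l1 with
    | nil => simp
    | cons y ys ih =>
      simp [PySem.List.insertBy, h1 y (List.mem_cons_self ..),
        ih (fun u hu => h1 u (List.mem_cons_of_mem _ hu))]

theorem pv_insertBy_mid {α : Type} (before : α → α → Bool) (x : α) (l1 l2 : List α)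
    (h1 : ∀ y ∈ l1, before x y = false) (h2 : ∀ y ∈ l2, before x y = true) :
    PySem.List.insertBy before x (l1 ++ l2) = l1 ++ x :: l2 := by
  rw [pv_insertBy_skip before x l1 l2 h1]
  cases l2 with
  | nil => simp [PySem.List.insertBy]
  | cons z zs => simp [PySem.List.insertBy, h2 z (List.mem_cons_self ..)]

def pvBC {α : Type} (key : α → Int) (vals : List Int) (xs : List α) : List α :=
  vals.flatMap (fun v => xs.filter (fun x => key x == v))

theorem pvBC_snoc_notmem {α : Type} (key : α → Int) (vals : List Int) (x : α)
    (hx : key x ∉ vals) (p : List α) : pvBC key vals (p ++ [x]) = pvBC key vals p := by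
  unfold pvBC
  induction vals with
  | nil => simp
  | cons v vs ih =>
    have hne : key x ≠ v := fun h => hx (h ▸ List.mem_cons_self ..)
    simp only [List.flatMap_cons]
    rw [ih (fun h => hx (List.mem_cons_of_mem _ h))]
    congr 1
    simp [List.filter_append, List.filter_cons, hne]

theorem pv_insertBy_bucket {α : Type} (key : α → Int) (vals : List Int)
    (hv : vals.Pairwise (· < ·)) (x : α) (hx : key x ∈ vals) (p : List α) :
    PySem.List.insertBy (fun a b => decide (key a < key b)) x (pvBC key vals p)
      = pvBC key vals (p ++ [x]) := by
  induction vals with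
  | nil => simp at hx
  | cons v vs ih =>
    have hlt : ∀ w ∈ vs, v < w := (List.pairwise_cons.mp hv).1
    have hvs : vs.Pairwise (· < ·) := (List.pairwise_cons.mp hv).2
    by_cases hx0 : key x = v
    · have hnot : key x ∉ vs := fun h => absurd (hlt _ h) (by omega)
      have hrest : pvBC key vs (p ++ [x]) = pvBC key vs p := pvBC_snoc_notmem key vs x hnot p
      simp only [pvBC, List.flatMap_cons] at *
      rw [hrest]
      have : (p ++ [x]).filter (fun y => key y == v) = p.filter (fun y => key y == v) ++ [x] := by
        simp [List.filter_append, List.filter_cons, hx0]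
      rw [this, List.append_assoc, List.singleton_append]
      exact pv_insertBy_mid _ x _ _
        (fun y hy => by
          have : key y = v := by simpa using (List.mem_filter.mp hy).2
          simp [this, hx0])
        (fun y hy => by
          obtain ⟨w, hw, hyw⟩ := List.mem_flatMap.mp hy
          have : key y = w := by simpa using (List.mem_filter.mp hyw).2
          have := hlt w hw
          simp only [decide_eq_true_eq]
          omega)
    · have hxvs : key x ∈ vs := by cases List.mem_cons.mp hx with
        | inl h => exact absurd h hx0
        | inr h => exact h
      simp only [pvBC, List.flatMap_cons] at *
      have hfilt : (p ++ [x]).filter (fun y => key y == v) = p.filter (fun y => key y == v) := by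
        simp [List.filter_append, List.filter_cons, hx0]
      rw [hfilt]
      rw [pv_insertBy_skip _ x _ _ (fun y hy => by
        have hky : key y = v := by simpa using (List.mem_filter.mp hy).2
        have := hlt _ hxvs
        simp only [decide_eq_false_iff_not]
        omega)]
      rw [ih hvs hxvs]

theorem pv_sorted_buckets {α : Type} (key : α → Int) (vals : List Int)
    (hv : vals.Pairwise (· < ·)) (xs : List α) (hx : ∀ x ∈ xs, key x ∈ vals) :
    PySem.List.sorted xs key false = pvBC key vals xs := by
  rw [PySem.List.sorted_eq_foldl_insertBy]
  have base : pvBC key vals ([] : List α) = [] := by simp [pvBC]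
  have aux : ∀ (ys : List α) (p : List α), (∀ y ∈ ys, key y ∈ vals) →
      ys.foldl (fun acc x => PySem.List.insertBy (fun a b => decide (key a < key b)) x acc)
        (pvBC key vals p) = pvBC key vals (p ++ ys) := by
    intro ys
    induction ys with
    | nil => intro p _; simp
    | cons y ys ih =>
      intro p hmem
      simp only [List.foldl_cons]
      rw [pv_insertBy_bucket key vals hv y (hmem y (List.mem_cons_self ..)) p,
        ih (p ++ [y]) (fun z hz => hmem z (List.mem_cons_of_mem _ hz))]
      simp
  have := aux xs [] hx
  rw [base] at this
  simpa using this

theorem pv_sev_rank_mem (k : String) : pvSevOrder.getD k 99 ∈ ([0, 1, 2, 3, 99] : List Int) := by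
  have : pvSevOrder = PySem.Dict.mk [("Critical", 0), ("High", 1), ("Medium", 2), ("Low", 3)] := by
    decide
  rw [this]
  simp only [PySem.Dict.getD_eq_get?_getD, PySem.Dict.get?_mk_cons]
  split_ifs <;> simp [PySem.Dict.get?]

theorem pv_tier_rank_mem (k : String) : pvTierOrder.getD k 99 ∈ ([0, 1, 2, 3, 99] : List Int) := by
  have : pvTierOrder = PySem.Dict.mk [("P0", 0), ("P1", 1), ("P2", 2), ("P3", 3)] := by
    decide
  rw [this]
  simp only [PySem.Dict.getD_eq_get?_getD, PySem.Dict.get?_mk_cons]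
  split_ifs <;> simp [PySem.Dict.get?]

theorem pv_ranked_eq (O : PySem.Dict String Int)
    (hO : ∀ k, O.getD k 99 ∈ ([0, 1, 2, 3, 99] : List Int))
    (keyed : List (String × List (String × String))) :
    PySem.List.sorted (pvGrp keyed) (fun x => O.getD x.1 99) false
      = pvGrp ([(0 : Int), 1, 2, 3, 99].flatMap
          (fun r => keyed.filter (fun p => O.getD p.1 99 == r))) := by
  rw [pv_sorted_buckets (fun x => O.getD x.1 99) [0, 1, 2, 3, 99]
      (by norm_num) (pvGrp keyed) (fun g _ => hO g.1)]
  rw [pvGrp_flatMap (fun k => O.getD k 99) _ (by norm_num) keyed]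
  simp only [pvBC]
  exact congrArg (fun f => List.flatMap f ([0, 1, 2, 3, 99] : List Int))
    (funext fun r => pvGrp_filter (fun k => O.getD k 99) r keyed)

theorem pv_main_ranked (O : PySem.Dict String Int)
    (hO : ∀ k, O.getD k 99 ∈ ([0, 1, 2, 3, 99] : List Int))
    (κ : List (String × String) → String) (findings : List (List (String × String))) :
    PySem.List.sorted
        ((findings.foldl (fun d f => d.modify (κ f) [] (fun g => g ++ [f]))
          PySem.Dict.empty).items)
        (fun x => O.getD x.1 99) false
      = (([(0 : Int), 1, 2, 3, 99].foldl
          (fun g r => (findings.map (fun f => (κ f, f))).foldl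
            (fun g p => if O.getD p.1 99 == r then g.modify p.1 [] (fun v => v ++ [p.2]) else g) g)
          PySem.Dict.empty).items) := by
  have h1 : findings.foldl (fun d f => d.modify (κ f) [] (fun g => g ++ [f])) PySem.Dict.empty
      = (findings.map (fun f => (κ f, f))).foldl
          (fun d p => d.modify p.1 [] (fun v => v ++ [p.2])) PySem.Dict.empty := by
    rw [List.foldl_map]
  rw [h1, pv_dict_fold_items, pv_ranked_eq O hO]
  have h2 : ([(0 : Int), 1, 2, 3, 99].foldl
      (fun g r => (findings.map (fun f => (κ f, f))).foldl
        (fun g p => if O.getD p.1 99 == r then g.modify p.1 [] (fun v => v ++ [p.2]) else g) g)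
      PySem.Dict.empty)
      = ([(0 : Int), 1, 2, 3, 99].flatMap
          (fun r => (findings.map (fun f => (κ f, f))).filter (fun p => O.getD p.1 99 == r))).foldl
          (fun d p => d.modify p.1 [] (fun v => v ++ [p.2])) PySem.Dict.empty := by
    rw [List.foldl_flatMap]
    apply PySem.List.foldl_congr_mem
    intro acc r _
    exact (List.foldl_filter).symm
  rw [h2, pv_dict_fold_items]

theorem pv_keyA_sev (f : List (String × String)) :
    pvKeyA "severity" f = pvRankedKeyB "severity" f := rfl

theorem pv_keyA_tier (f : List (String × String)) :
    pvKeyA "tier" f = pvRankedKeyB "tier" f := rfl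

theorem pv_keyA_plain (group_by : String) (h : group_by ≠ "tier") (f : List (String × String)) :
    pvKeyA group_by f = pvPlainKeyB group_by f := by
  have ht : (group_by == "tier") = false := beq_eq_false_iff_ne.mpr h
  simp only [pvKeyA, pvPlainKeyB, ht, Bool.false_eq_true, if_false]

-- ===== VERDICT (by name: the statement is the Claim_ definition above) =====
theorem group_findings_py_spec : Claim_equal_group_findings_py := by
  intro findings group_by _ _
  unfold Spec_group_findings_py group_findings_py group_findings_py_alt
  by_cases h1 : group_by = "severity"
  · subst h1
    simp only [show (("severity" : String) == "severity") = true from rfl,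
      show (("severity" : String) == "tier") = false from rfl, if_true, Bool.true_or]
    have hk : pvRankedKeyB "severity" = pvKeyA "severity" :=
      funext fun f => (pv_keyA_sev f).symm
    rw [hk]
    exact pv_main_ranked pvSevOrder pv_sev_rank_mem (pvKeyA "severity") findings
  · by_cases h2 : group_by = "tier"
    · subst h2
      simp only [show (("tier" : String) == "severity") = false from rfl,
        show (("tier" : String) == "tier") = true from rfl, Bool.false_eq_true, if_false,
        if_true, Bool.false_or]
      have hk : pvRankedKeyB "tier" = pvKeyA "tier" :=
        funext fun f => (pv_keyA_tier f).symm
      rw [hk]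
      exact pv_main_ranked pvTierOrder pv_tier_rank_mem (pvKeyA "tier") findings
    · have hs : (group_by == "severity") = false := beq_eq_false_iff_ne.mpr h1
      have ht : (group_by == "tier") = false := beq_eq_false_iff_ne.mpr h2
      simp only [hs, ht, Bool.false_eq_true, if_false, Bool.false_or]
      have hk : pvPlainKeyB group_by = pvKeyA group_by :=
        funext fun f => (pv_keyA_plain group_by h2 f).symm
      rw [hk]
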